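-- pv_equiv track=rewrite | github.com/dhilbert/BOIN_PLANNING | 00.checker/Element/Grade4_2/triangle422.py | equal_list
-- ===== SOURCE A (Python) =====
-- def equal_list(elements,l):
--     if l == []:
--         return False
--     for temp_l in l:
--         temp_elements = elements.copy()
--         for i in range(len(temp_l)):
--             if temp_l[i] in temp_elements:
--                 temp_elements.remove(temp_l[i])
--         if temp_elements == []:
--             return True
--
--     return False
-- ===== SOURCE B (Python) =====
-- def _covers(need, have):
--     # two-pointer merge over two sorted lists: does `have` multiset-cover `need`?
--     i = 0
--     for x in have:
--         if i == len(need):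
--             break
--         if x == need[i]:
--             i += 1
--         elif x > need[i]:
--             return False
--     return i == len(need)
--
-- def equal_list(elements, l):
--     if l == []:
--         return False
--     need = sorted(elements)
--     for temp_l in l:
--         if _covers(need, sorted(temp_l)):
--             return True
--     return False
-- ===== Notes on version B (the rewrite author's own statement) =====
-- stated objective: faster
-- what changed: Replaces A's per-candidate copy + repeated membership/remove scans with sorting elements once and a two-pointer merge over each sorted sublist.
import Mathlib
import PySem

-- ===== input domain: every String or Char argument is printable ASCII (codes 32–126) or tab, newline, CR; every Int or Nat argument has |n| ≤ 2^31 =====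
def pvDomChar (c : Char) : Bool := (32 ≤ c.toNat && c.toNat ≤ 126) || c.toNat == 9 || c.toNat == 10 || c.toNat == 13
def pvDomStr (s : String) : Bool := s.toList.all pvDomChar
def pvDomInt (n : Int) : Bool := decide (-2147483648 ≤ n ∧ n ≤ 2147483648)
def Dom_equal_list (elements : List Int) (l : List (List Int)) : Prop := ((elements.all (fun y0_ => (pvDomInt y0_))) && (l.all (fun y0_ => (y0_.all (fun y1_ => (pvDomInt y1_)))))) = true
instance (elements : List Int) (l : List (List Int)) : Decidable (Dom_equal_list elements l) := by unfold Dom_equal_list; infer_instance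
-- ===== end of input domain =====

-- B sorts `elements` once and checks each sublist with a sort + two-pointer merge,
-- replacing A's per-candidate copy and repeated membership/remove scans (objective: faster).


-- ===== PORT A =====
-- inner loop: for i in range(len(temp_l)): if temp_l[i] in temp_elements: temp_elements.remove(temp_l[i])
-- (indexing i over range(len(temp_l)) visits exactly the elements of temp_l in order; exact)
def removeLoopA (temp_elements : List Int) (temp_l : List Int) : List Int :=
  temp_l.foldl
    (fun te x => if te.contains x then (PySem.List.remove? te x).getD te else te)
    temp_elements

-- outer loop with early return True
def goA (elements : List Int) : List (List Int) → Bool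
  | [] => false
  | temp_l :: rest =>
      if removeLoopA elements temp_l = [] then true else goA elements rest

def equal_list (elements : List Int) (l : List (List Int)) : Bool :=
  if l = [] then false else goA elements l

-- ===== PORT B =====
-- two-pointer merge over two ascending lists: does `have` multiset-cover `need`?
def coverB : List Int → List Int → Bool
  | [], _ => true
  | _ :: _, [] => false
  | e :: es, x :: xs =>
      if x = e then coverB es xs
      else if x < e then coverB (e :: es) xs
      else false

def equal_list_alt (elements : List Int) (l : List (List Int)) : Bool :=
  if l = [] then false
  else
    let need := PySem.List.sorted elements (fun x => x) false
    l.any (fun temp_l => coverB need (PySem.List.sorted temp_l (fun x => x) false))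

-- ===== PRECONDITION & SPEC =====
def Spec_equal_list (elements : List Int) (l : List (List Int)) (out : Bool) : Prop := out = equal_list_alt elements l
instance (elements : List Int) (l : List (List Int)) (out : Bool) : Decidable (Spec_equal_list elements l out) := by unfold Spec_equal_list; infer_instance

-- ===== CLAIM (what is proved, stated in full; the proofs are below) =====
def Claim_equal_equal_list : Prop := ∀ (elements : List Int) (l : List (List Int)), Dom_equal_list elements l → Spec_equal_list elements l (equal_list elements l)

-- ===== LEMMAS AND PROOFS =====

-- A's guarded remove step is List.erase
theorem removeStep_eq_erase (te : List Int) (x : Int) :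
    (if te.contains x then (PySem.List.remove? te x).getD te else te) = te.erase x := by
  by_cases h : x ∈ te
  · simp [h, PySem.List.remove?_eq_some_erase _ _ h]
  · simp [List.contains_eq_mem, h, List.erase_of_not_mem h]

-- the inner-loop result as a multiset difference
theorem removeLoopA_coe (te tl : List Int) :
    (↑(removeLoopA te tl) : Multiset Int) = ↑te - ↑tl := by
  induction tl generalizing te with
  | nil => simp [removeLoopA]
  | cons x tl ih =>
      have hstep : removeLoopA te (x :: tl) = removeLoopA (te.erase x) tl := by
        unfold removeLoopA
        rw [List.foldl_cons, removeStep_eq_erase]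
      rw [hstep, ih]
      rw [show ((x :: tl : List Int) : Multiset Int) = x ::ₘ (↑tl : Multiset Int) from rfl]
      rw [Multiset.sub_cons]
      exact congrArg (· - (↑tl : Multiset Int)) (Multiset.coe_erase te x)

theorem removeLoopA_empty_iff (te tl : List Int) :
    removeLoopA te tl = [] ↔ (↑te : Multiset Int) ≤ ↑tl := by
  rw [← Multiset.coe_eq_zero, removeLoopA_coe, tsub_eq_zero_iff_le]

-- correctness of the two-pointer merge on ascending lists
theorem coverB_iff (xs : List Int) : ∀ (es : List Int),
    es.Pairwise (· ≤ ·) → xs.Pairwise (· ≤ ·) →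
    (coverB es xs = true ↔ (↑es : Multiset Int) ≤ ↑xs) := by
  induction xs with
  | nil =>
      intro es _ _
      cases es with
      | nil => simp [coverB]
      | cons e es => simp [coverB]
  | cons x xs ih =>
      intro es hes hxs
      cases es with
      | nil => simp [coverB]
      | cons e es =>
          have hes' := (List.pairwise_cons.mp hes).2
          have hxs' := (List.pairwise_cons.mp hxs).2
          by_cases hxe : x = e
          · subst hxe
            rw [show coverB (x :: es) (x :: xs) = coverB es xs from by simp [coverB]]
            rw [ih es hes' hxs']
            rw [show ((x :: es : List Int) : Multiset Int) = x ::ₘ (↑es : Multiset Int) from rfl,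
                show ((x :: xs : List Int) : Multiset Int) = x ::ₘ (↑xs : Multiset Int) from rfl]
            exact (Multiset.cons_le_cons_iff x).symm
          · rcases lt_or_ge x e with hlt | hle
            · -- x < e : skip x
              rw [show coverB (e :: es) (x :: xs) = coverB (e :: es) xs from by
                simp [coverB, hxe, hlt]]
              rw [ih (e :: es) hes hxs']
              constructor
              · intro h
                exact h.trans (by
                  rw [show ((x :: xs : List Int) : Multiset Int) = x ::ₘ (↑xs : Multiset Int) from rfl]
                  exact Multiset.le_cons_self _ _)
              · intro h
                rw [Multiset.le_iff_count] at h ⊢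
                intro a
                have ha := h a
                rcases eq_or_ne a x with rfl | hax
                · have hnot : a ∉ e :: es := by
                    intro hmem
                    rcases List.mem_cons.mp hmem with rfl | hmem'
                    · exact absurd hlt (lt_irrefl a)
                    · exact absurd (hlt.trans_le ((List.pairwise_cons.mp hes).1 a hmem'))
                        (lt_irrefl a)
                  have hz : Multiset.count a (↑(e :: es) : Multiset Int) = 0 :=
                    Multiset.count_eq_zero_of_notMem
                      (fun hm => hnot (Multiset.mem_coe.mp hm))
                  simp [hz]
                · have hcx : Multiset.count a (↑(x :: xs) : Multiset Int)
                      = Multiset.count a (↑xs : Multiset Int) := by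
                    rw [show ((x :: xs : List Int) : Multiset Int) = x ::ₘ (↑xs : Multiset Int) from rfl,
                        Multiset.count_cons_of_ne hax]
                  rw [← hcx]
                  exact ha
            · -- e < x : no match possible for e
              have hxe' : e ≠ x := fun hh => hxe hh.symm
              have hex : e < x := lt_of_le_of_ne hle hxe'
              rw [show coverB (e :: es) (x :: xs) = false from by
                simp [coverB, hxe, not_lt.mpr hle]]
              simp only [Bool.false_eq_true, false_iff]
              intro h
              have hnot : e ∉ x :: xs := by
                intro hmem
                rcases List.mem_cons.mp hmem with rfl | hmem'
                · exact absurd hex (lt_irrefl e)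
                · exact absurd ((List.pairwise_cons.mp hxs).1 e hmem')
                    (not_le.mpr hex)
              have hcnt := Multiset.le_iff_count.mp h e
              rw [Multiset.count_eq_zero_of_notMem (fun hm => hnot (Multiset.mem_coe.mp hm))] at hcnt
              have hpos : 0 < Multiset.count e (↑(e :: es) : Multiset Int) :=
                Multiset.count_pos.mpr (by simp)
              omega

-- per-candidate predicates agree
theorem pred_agree (elements temp_l : List Int) :
    (removeLoopA elements temp_l = []) ↔
      coverB (PySem.List.sorted elements (fun x => x) false)
             (PySem.List.sorted temp_l (fun x => x) false) = true := by
  rw [removeLoopA_empty_iff]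
  rw [coverB_iff _ _ (PySem.List.sorted_pairwise elements (fun x => x))
        (PySem.List.sorted_pairwise temp_l (fun x => x))]
  constructor
  · intro h
    calc (↑(PySem.List.sorted elements (fun x => x) false) : Multiset Int)
        = ↑elements := Quot.sound (PySem.List.sorted_perm ..)
      _ ≤ ↑temp_l := h
      _ = ↑(PySem.List.sorted temp_l (fun x => x) false) :=
          (Quot.sound (PySem.List.sorted_perm ..)).symm
  · intro h
    calc (↑elements : Multiset Int)
        = ↑(PySem.List.sorted elements (fun x => x) false) :=
          (Quot.sound (PySem.List.sorted_perm ..)).symm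
      _ ≤ ↑(PySem.List.sorted temp_l (fun x => x) false) := h
      _ = ↑temp_l := Quot.sound (PySem.List.sorted_perm ..)

theorem goA_eq_any (elements : List Int) (l : List (List Int)) :
    goA elements l =
      l.any (fun temp_l =>
        coverB (PySem.List.sorted elements (fun x => x) false)
               (PySem.List.sorted temp_l (fun x => x) false)) := by
  induction l with
  | nil => simp [goA]
  | cons tl rest ih =>
      simp only [goA, List.any_cons]
      cases hb : coverB (PySem.List.sorted elements (fun x => x) false)
          (PySem.List.sorted tl (fun x => x) false) with
      | true => simp [(pred_agree elements tl).mpr hb]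
      | false =>
          have h : removeLoopA elements tl ≠ [] := by
            intro h
            simp [(pred_agree elements tl).mp h] at hb
          simp [h, ih]

-- ===== VERDICT (by name: the statement is the Claim_ definition above) =====
theorem equal_list_spec : Claim_equal_equal_list := by
  intro elements l _
  unfold Spec_equal_list equal_list equal_list_alt
  by_cases h : l = []
  · simp [h]
  · simp only [h, if_false]
    exact goA_eq_any elements l
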